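-- pv_equiv track=rewrite | github.com/andreavadacchino/eaa-scanner | webapp/app_fastapi.py | _determine_page_type_OLD_REMOVED
-- ===== SOURCE A (Python) =====
-- def _determine_page_type_OLD_REMOVED(url: str, title: str, soup) -> str:
--     """Determine page type based on URL and content"""
--     url_lower = url.lower()
--     title_lower = title.lower()
--
--     if any(term in url_lower for term in ['home', 'index', '/', 'homepage']):
--         return "homepage"
--     elif any(term in url_lower for term in ['contact', 'contatti']):
--         return "contatti"
--     elif any(term in url_lower for term in ['login', 'signin', 'account', 'area-clienti']):
--         return "autenticazione"
--     elif any(term in url_lower for term in ['privacy', 'cookie', 'legal', 'terms']):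
--         return "legal"
--     elif any(term in url_lower for term in ['service', 'servizi', 'product', 'prodotti']):
--         return "servizi"
--     elif any(term in title_lower for term in ['chi siamo', 'about', 'storia', 'company']):
--         return "contenuti"
--     else:
--         return "contenuti"
-- ===== SOURCE B (Python) =====
-- # Flat keyword->(priority,label,target) map scanned in one pass keeping the
-- # best (lowest-priority) match; no per-group any() and no early return.
-- _KEYWORDS = {
--     "home": (0, "homepage", False),
--     "index": (0, "homepage", False),
--     "/": (0, "homepage", False),
--     "homepage": (0, "homepage", False),
--     "contact": (1, "contatti", False),
--     "contatti": (1, "contatti", False),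
--     "login": (2, "autenticazione", False),
--     "signin": (2, "autenticazione", False),
--     "account": (2, "autenticazione", False),
--     "area-clienti": (2, "autenticazione", False),
--     "privacy": (3, "legal", False),
--     "cookie": (3, "legal", False),
--     "legal": (3, "legal", False),
--     "terms": (3, "legal", False),
--     "service": (4, "servizi", False),
--     "servizi": (4, "servizi", False),
--     "product": (4, "servizi", False),
--     "prodotti": (4, "servizi", False),
--     "chi siamo": (5, "contenuti", True),
--     "about": (5, "contenuti", True),
--     "storia": (5, "contenuti", True),
--     "company": (5, "contenuti", True),
-- }
--
--
-- def _determine_page_type_OLD_REMOVED(url: str, title: str, soup) -> str: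
--     """Single pass over a flat keyword map, keeping the lowest-priority match."""
--     url_l = url.lower()
--     title_l = title.lower()
--     best = None
--     for kw, (prio, label, use_title) in _KEYWORDS.items():
--         text = title_l if use_title else url_l
--         if kw in text and (best is None or prio < best[0]):
--             best = (prio, label)
--     return "contenuti" if best is None else best[1]
-- ===== Notes on version B (the rewrite author's own statement) =====
-- stated objective: alternative
-- what changed: Replaces the six-branch first-match if/elif chain (each with its own any() scan and early return) by a single exhaustive pass over a flat keyword->(priority,label,target) map that keeps the lowest-priority matching entry in an accumulator and selects it at the end.
import Mathlib
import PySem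

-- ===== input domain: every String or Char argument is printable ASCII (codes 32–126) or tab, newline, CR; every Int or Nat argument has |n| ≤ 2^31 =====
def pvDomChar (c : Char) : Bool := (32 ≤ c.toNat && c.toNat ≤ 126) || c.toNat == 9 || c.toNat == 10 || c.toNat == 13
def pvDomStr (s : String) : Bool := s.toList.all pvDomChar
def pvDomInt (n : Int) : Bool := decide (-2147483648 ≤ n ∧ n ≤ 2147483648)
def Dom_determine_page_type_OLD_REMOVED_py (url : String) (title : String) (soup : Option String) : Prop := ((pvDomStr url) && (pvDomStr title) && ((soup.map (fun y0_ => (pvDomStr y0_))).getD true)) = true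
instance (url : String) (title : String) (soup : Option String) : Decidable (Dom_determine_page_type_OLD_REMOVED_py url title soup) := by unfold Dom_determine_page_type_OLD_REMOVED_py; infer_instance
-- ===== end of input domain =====

-- B replaces A's first-match if/elif chain by one exhaustive pass over a flat keyword map keeping the lowest-priority match (objective: alternative).

-- ===== PORT A =====
def determine_page_type_OLD_REMOVED_py (url : String) (title : String) (_soup : Option String) : String :=
  let url_lower := PySem.Str.lower url
  let title_lower := PySem.Str.lower title
  if (["home", "index", "/", "homepage"] : List String).any (fun term => PySem.Str.isIn term url_lower) then
    "homepage"
  else if (["contact", "contatti"] : List String).any (fun term => PySem.Str.isIn term url_lower) then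
    "contatti"
  else if (["login", "signin", "account", "area-clienti"] : List String).any (fun term => PySem.Str.isIn term url_lower) then
    "autenticazione"
  else if (["privacy", "cookie", "legal", "terms"] : List String).any (fun term => PySem.Str.isIn term url_lower) then
    "legal"
  else if (["service", "servizi", "product", "prodotti"] : List String).any (fun term => PySem.Str.isIn term url_lower) then
    "servizi"
  else if (["chi siamo", "about", "storia", "company"] : List String).any (fun term => PySem.Str.isIn term title_lower) then
    "contenuti"
  else
    "contenuti"

-- ===== PORT B =====
-- _KEYWORDS dict in insertion order: entry = (keyword, priority, label, use_title)
def pvTable : List (String × Int × String × Bool) :=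
  [ ("home", 0, "homepage", false), ("index", 0, "homepage", false),
    ("/", 0, "homepage", false), ("homepage", 0, "homepage", false),
    ("contact", 1, "contatti", false), ("contatti", 1, "contatti", false),
    ("login", 2, "autenticazione", false), ("signin", 2, "autenticazione", false),
    ("account", 2, "autenticazione", false), ("area-clienti", 2, "autenticazione", false),
    ("privacy", 3, "legal", false), ("cookie", 3, "legal", false),
    ("legal", 3, "legal", false), ("terms", 3, "legal", false),
    ("service", 4, "servizi", false), ("servizi", 4, "servizi", false),
    ("product", 4, "servizi", false), ("prodotti", 4, "servizi", false),
    ("chi siamo", 5, "contenuti", true), ("about", 5, "contenuti", true),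
    ("storia", 5, "contenuti", true), ("company", 5, "contenuti", true) ]

-- loop body of B: update `best` when kw matches its text and has lower priority
def pvStep (url_l title_l : String) (best : Option (Int × String))
    (e : String × Int × String × Bool) : Option (Int × String) :=
  let text := if e.2.2.2 then title_l else url_l
  if PySem.Str.isIn e.1 text &&
      (match best with | none => true | some b => decide (e.2.1 < b.1)) then
    some (e.2.1, e.2.2.1)
  else
    best

def determine_page_type_OLD_REMOVED_py_alt (url : String) (title : String) (_soup : Option String) : String :=
  let url_l := PySem.Str.lower url
  let title_l := PySem.Str.lower title
  let best := pvTable.foldl (pvStep url_l title_l) none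
  match best with
  | none => "contenuti"
  | some b => b.2

-- ===== PRECONDITION & SPEC =====
def Spec_determine_page_type_OLD_REMOVED_py (url : String) (title : String) (soup : Option String) (out : String) : Prop := out = determine_page_type_OLD_REMOVED_py_alt url title soup
instance (url : String) (title : String) (soup : Option String) (out : String) : Decidable (Spec_determine_page_type_OLD_REMOVED_py url title soup out) := by unfold Spec_determine_page_type_OLD_REMOVED_py; infer_instance

-- ===== CLAIM (what is proved, stated in full; the proofs are below) =====
def Claim_equal_determine_page_type_OLD_REMOVED_py : Prop := ∀ (url : String) (title : String) (soup : Option String), Dom_determine_page_type_OLD_REMOVED_py url title soup → Spec_determine_page_type_OLD_REMOVED_py url title soup (determine_page_type_OLD_REMOVED_py url title soup)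

-- ===== LEMMAS AND PROOFS =====

-- folding one priority group (all entries share priority p, label l, target tgt):
-- the result is (p,l) iff some keyword matches and the accumulator allows it.
theorem pvGroupFold (u t : String) (p : Int) (l : String) (tgt : Bool) (txt : String)
    (htxt : (if tgt then t else u) = txt)
    (kws : List String) (acc : Option (Int × String)) :
    (kws.map (fun kw => (kw, p, l, tgt))).foldl (pvStep u t) acc
      = if kws.any (fun kw => PySem.Str.isIn kw txt) &&
            (match acc with | none => true | some b => decide (p < b.1)) then
          some (p, l)
        else acc := by
  induction kws generalizing acc with
  | nil => simp
  | cons kw rest ih =>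
    simp only [List.map_cons, List.foldl_cons, List.any_cons, pvStep, htxt]
    rw [ih]
    rcases acc with _ | b
    · by_cases hm : PySem.Chars.isIn kw.toList txt.toList = true <;> simp [hm]
    · by_cases hm : PySem.Chars.isIn kw.toList txt.toList = true <;>
        by_cases hp : p < b.1 <;> simp [hm, hp]

-- ===== VERDICT (by name: the statement is the Claim_ definition above) =====
theorem determine_page_type_OLD_REMOVED_py_spec : Claim_equal_determine_page_type_OLD_REMOVED_py := by
  intro url title soup _
  unfold Spec_determine_page_type_OLD_REMOVED_py determine_page_type_OLD_REMOVED_py determine_page_type_OLD_REMOVED_py_alt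
  set u := PySem.Str.lower url with hu
  set t := PySem.Str.lower title with ht
  have htab : pvTable
      = (["home", "index", "/", "homepage"].map (fun kw => (kw, (0:Int), "homepage", false)))
      ++ (["contact", "contatti"].map (fun kw => (kw, (1:Int), "contatti", false)))
      ++ (["login", "signin", "account", "area-clienti"].map (fun kw => (kw, (2:Int), "autenticazione", false)))
      ++ (["privacy", "cookie", "legal", "terms"].map (fun kw => (kw, (3:Int), "legal", false)))
      ++ (["service", "servizi", "product", "prodotti"].map (fun kw => (kw, (4:Int), "servizi", false)))
      ++ (["chi siamo", "about", "storia", "company"].map (fun kw => (kw, (5:Int), "contenuti", true))) := by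
    rfl
  rw [htab]
  simp only [List.foldl_append,
    pvGroupFold u t 0 "homepage" false u rfl,
    pvGroupFold u t 1 "contatti" false u rfl,
    pvGroupFold u t 2 "autenticazione" false u rfl,
    pvGroupFold u t 3 "legal" false u rfl,
    pvGroupFold u t 4 "servizi" false u rfl,
    pvGroupFold u t 5 "contenuti" true t rfl]
  generalize (["home", "index", "/", "homepage"] : List String).any (fun kw => PySem.Str.isIn kw u) = b0
  generalize (["contact", "contatti"] : List String).any (fun kw => PySem.Str.isIn kw u) = b1
  generalize (["login", "signin", "account", "area-clienti"] : List String).any (fun kw => PySem.Str.isIn kw u) = b2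
  generalize (["privacy", "cookie", "legal", "terms"] : List String).any (fun kw => PySem.Str.isIn kw u) = b3
  generalize (["service", "servizi", "product", "prodotti"] : List String).any (fun kw => PySem.Str.isIn kw u) = b4
  generalize (["chi siamo", "about", "storia", "company"] : List String).any (fun kw => PySem.Str.isIn kw t) = b5
  revert b0 b1 b2 b3 b4 b5
  decide
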